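-- pv_equiv track=rewrite | github.com/naolca/A2SV | theaterSquare.py | theatreSquare
-- ===== SOURCE A (Python) =====
-- def theatreSquare(n,m,a):
--     vertically=1#this stores the minimum number of granites to cover the vertical part of the square.
--     temp=a
--     while a<n:
--         a*=2
--         vertically+=1
--     horisontally=1##this stores the minimum number of granites to cover the horisontal part of the square.
--     a=temp
--     while a<m:
--         a*=2
--         horisontally+=1
--
--     return horisontally*vertically
-- ===== SOURCE B (Python) =====
-- def theatreSquare(n, m, a):
--     # Closed form: per dimension, tiles = 1 + minimal t with a*2^t >= d,
--     # i.e. bit_length of ceil(d/a)-1 (clamped at 0), plus one. No loop.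
--     def side(d):
--         q = (d + a - 1) // a
--         return max(q - 1, 0).bit_length() + 1
--     return side(n) * side(m)
-- ===== Notes on version B (the rewrite author's own statement) =====
-- stated objective: simpler
-- what changed: Each doubling while-loop is replaced by a single closed-form expression: the side count is bit_length(ceil(d/a)-1)+1, so B executes no iteration at all.
-- outside the precondition, e.g. on theatreSquare(-5, -5, -1): A returns 1, B returns 16; on theatreSquare(0, 0, 0): A returns 1, B raises ZeroDivisionError
import Mathlib
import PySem

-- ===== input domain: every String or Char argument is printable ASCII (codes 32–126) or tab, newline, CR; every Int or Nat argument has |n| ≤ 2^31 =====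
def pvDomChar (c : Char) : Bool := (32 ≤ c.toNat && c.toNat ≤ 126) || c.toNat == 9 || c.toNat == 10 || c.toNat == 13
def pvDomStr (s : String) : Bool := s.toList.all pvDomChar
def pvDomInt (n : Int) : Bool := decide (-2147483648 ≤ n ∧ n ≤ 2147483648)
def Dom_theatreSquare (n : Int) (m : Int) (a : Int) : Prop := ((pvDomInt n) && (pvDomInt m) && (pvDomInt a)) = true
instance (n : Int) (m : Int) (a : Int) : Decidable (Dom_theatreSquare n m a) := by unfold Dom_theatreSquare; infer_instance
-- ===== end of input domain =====

-- B replaces each doubling while-loop of A by a closed-form bit_length expression (simpler; no iteration).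

-- ===== PORT A =====
-- One while-loop of A: 'count = 1; while a < d: a *= 2; count += 1'.
-- The '0 < a' guard only makes the recursion terminate where the Python loop DIVERGES
-- (a ≤ 0 < d keeps a < d forever); those inputs are excluded by Pre_theatreSquare.
def pvLoopA (a d : Int) : Int :=
  if h : a < d ∧ 0 < a then pvLoopA (2 * a) d + 1 else 1
termination_by (d - a).toNat
decreasing_by
  omega

def theatreSquare (n : Int) (m : Int) (a : Int) : Int :=
  -- A computes 'vertically' (for n), then 'horisontally' (for m), returns horisontally*vertically
  pvLoopA a m * pvLoopA a n

-- ===== PORT B =====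
def pvSide (d : Int) (a : Int) : Int :=
  let q := PySem.Int.floordiv (d + a - 1) a
  (PySem.Int.bitLength (max (q - 1) 0) : Int) + 1

def theatreSquare_alt (n : Int) (m : Int) (a : Int) : Int :=
  pvSide n a * pvSide m a

-- ===== PRECONDITION & SPEC =====
-- Pre_ excludes a ≤ 0: there A loops forever whenever a dimension exceeds a, and the value 1 it
-- returns on the remaining non-positive corners is an artefact of the loop guard (B divides by a).
def Pre_theatreSquare (n : Int) (m : Int) (a : Int) : Prop := 1 ≤ a
instance (n : Int) (m : Int) (a : Int) : Decidable (Pre_theatreSquare n m a) := by unfold Pre_theatreSquare; infer_instance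

def pvWitness_theatreSquare : Int × Int × Int := (6, 6, 4)

def Spec_theatreSquare (n : Int) (m : Int) (a : Int) (out : Int) : Prop := out = theatreSquare_alt n m a
instance (n : Int) (m : Int) (a : Int) (out : Int) : Decidable (Spec_theatreSquare n m a out) := by unfold Spec_theatreSquare; infer_instance

-- ===== CLAIM (what is proved, stated in full; the proofs are below) =====
def Claim_equal_theatreSquare : Prop := ∀ (n : Int) (m : Int) (a : Int), Dom_theatreSquare n m a → Pre_theatreSquare n m a → Spec_theatreSquare n m a (theatreSquare n m a)

-- ===== LEMMAS AND PROOFS =====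

-- ceiling division q = (d + a - 1) // a (a > 0) satisfies a*(q-1) < d ≤ a*q
lemma pvCeil_bounds (a d : Int) (ha : 0 < a) :
    a * (PySem.Int.floordiv (d + a - 1) a - 1) < d ∧ d ≤ a * (PySem.Int.floordiv (d + a - 1) a) := by
  have h := PySem.Int.floordiv_mul_add_mod (d + a - 1) a
  have h1 := PySem.Int.mod_nonneg (d + a - 1) ha
  have h2 := PySem.Int.mod_lt (d + a - 1) ha
  constructor <;> nlinarith

lemma pvCeil_unique (a d q : Int) (ha : 0 < a) (h1 : a * (q - 1) < d) (h2 : d ≤ a * q) :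
    PySem.Int.floordiv (d + a - 1) a = q := by
  obtain ⟨b1, b2⟩ := pvCeil_bounds a d ha
  set p := PySem.Int.floordiv (d + a - 1) a with hp
  have hpq : p - 1 < q := by
    have := lt_of_lt_of_le b1 h2
    exact lt_of_mul_lt_mul_left this ha.le
  have hqp : q - 1 < p := by
    have := lt_of_lt_of_le h1 b2
    exact lt_of_mul_lt_mul_left this ha.le
  omega

-- doubling step: for a > 0 and a < d, one loop iteration corresponds to halving ceil(d/a)-1
lemma pvSide_step (a d : Int) (ha : 0 < a) (had : a < d) :
    pvSide d (2 * a) + 1 = pvSide d a := by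
  obtain ⟨b1, b2⟩ := pvCeil_bounds a d ha
  set q := PySem.Int.floordiv (d + a - 1) a with hq
  have hq2 : 2 ≤ q := by nlinarith
  -- c := ceil(q/2)
  set c := (q + 1) / 2 with hc
  have hcb : q ≤ 2 * c ∧ 2 * c ≤ q + 1 := by omega
  have hq' : PySem.Int.floordiv (d + 2 * a - 1) (2 * a) = c := by
    apply pvCeil_unique (2 * a) d c (by omega)
    · have : 2 * (c - 1) ≤ q - 1 := by omega
      nlinarith
    · nlinarith
  have hc1 : 1 ≤ c := by omega
  simp only [pvSide, hq', ← hq]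
  have hmq : max (q - 1) 0 = q - 1 := by omega
  have hmc : max (c - 1) 0 = c - 1 := by omega
  rw [hmq, hmc]
  have hbl : PySem.Int.bitLength (q - 1) = PySem.Int.bitLength (PySem.Int.floordiv (q - 1) 2) + 1 :=
    PySem.Int.bitLength_of_pos (by omega : (0:Int) < q - 1)
  have hhalf : PySem.Int.floordiv (q - 1) 2 = c - 1 := by
    rw [PySem.Int.floordiv_eq_ediv_of_pos (by omega : (0:Int) < 2)]
    omega
  rw [hbl, hhalf]
  push_cast
  ring

lemma pvLoop_eq_side (d : Int) : ∀ a : Int, 0 < a → pvLoopA a d = pvSide d a := by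
  intro a
  induction a using pvLoopA.induct (d := d) with
  | case1 a h ih =>
    intro ha
    rw [pvLoopA]
    simp only [dif_pos h]
    rw [ih (by omega), pvSide_step a d ha h.1]
  | case2 a h =>
    intro ha
    rw [pvLoopA]
    simp only [dif_neg h]
    have hda : d ≤ a := by omega
    obtain ⟨b1, b2⟩ := pvCeil_bounds a d ha
    set q := PySem.Int.floordiv (d + a - 1) a with hq
    have hq1 : q ≤ 1 := by nlinarith
    simp only [pvSide, ← hq]
    have : max (q - 1) 0 = 0 := by omega
    rw [this, PySem.Int.bitLength_zero]
    simp

-- ===== VERDICT (by name: the statement is the Claim_ definition above) =====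
theorem theatreSquare_spec : Claim_equal_theatreSquare := by
  intro n m a _ hpre
  unfold Spec_theatreSquare theatreSquare theatreSquare_alt
  rw [pvLoop_eq_side m a hpre, pvLoop_eq_side n a hpre]
  ring
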